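-- pv_equiv track=rewrite | github.com/YebowenHu/SportsGen | benchmark.py | initial_team_scores
-- ===== SOURCE A (Python) =====
-- def initial_team_scores(pbp_data):
--     init_score = {}
--     for play in pbp_data[0]:
--         if play['ScoringPlay']:
--             init_score[play['team']] = 0
--         if len(init_score.keys()) == 2:
--             break
--     return init_score
-- ===== SOURCE B (Python) =====
-- def _first_scoring(plays, exclude=None):
--     """First scoring play whose team differs from exclude: return (team, remaining plays)."""
--     for i, play in enumerate(plays):
--         if play['ScoringPlay'] and play['team'] != exclude:
--             return play['team'], plays[i + 1:]
--     return None, []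
--
-- def initial_team_scores(pbp_data):
--     first, rest = _first_scoring(pbp_data[0])
--     if first is None:
--         return {}
--     second, _ = _first_scoring(rest, first)
--     return {first: 0} if second is None else {first: 0, second: 0}
-- ===== Notes on version B (the rewrite author's own statement) =====
-- stated objective: alternative
-- what changed: Replaces A's single loop that grows a mutable dict and breaks on a size check with two staged searches: find the first scoring team, then search the remaining plays for the first scoring team different from it, and assemble the dict from the at-most-two results.
import Mathlib
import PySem

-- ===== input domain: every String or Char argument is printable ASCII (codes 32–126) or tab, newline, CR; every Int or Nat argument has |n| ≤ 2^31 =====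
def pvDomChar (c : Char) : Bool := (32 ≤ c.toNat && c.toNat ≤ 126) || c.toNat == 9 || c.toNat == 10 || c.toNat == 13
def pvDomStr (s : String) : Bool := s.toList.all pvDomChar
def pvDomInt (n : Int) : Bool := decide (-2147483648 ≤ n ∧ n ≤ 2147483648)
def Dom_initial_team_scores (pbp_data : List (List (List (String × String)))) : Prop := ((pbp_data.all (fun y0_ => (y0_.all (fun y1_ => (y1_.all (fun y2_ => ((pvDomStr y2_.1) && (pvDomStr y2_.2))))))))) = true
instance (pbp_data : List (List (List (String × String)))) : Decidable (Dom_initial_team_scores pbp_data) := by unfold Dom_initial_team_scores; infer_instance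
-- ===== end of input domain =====

-- B replaces A's grow-a-dict-and-break loop by two staged searches (first scoring team, then first different scoring team); alternative decomposition, same cost.

-- ===== PORT A =====
-- play['ScoringPlay'] truthiness / play['team']; inside Pre_ the keys are present on every play A visits,
-- so the getD defaults are never the raising case there
def pvTruthy (play : List (String × String)) : Bool := ((play.lookup "ScoringPlay").getD "") ≠ ""
def pvTeam (play : List (String × String)) : String := (play.lookup "team").getD ""

def pvLoopA : List (List (String × String)) → PySem.Dict String Int → PySem.Dict String Int
  | [], d => d
  | play :: rest, d =>
    let d' := if pvTruthy play then d.insert (pvTeam play) 0 else d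
    if d'.size == 2 then d' else pvLoopA rest d'

def initial_team_scores (pbp_data : List (List (List (String × String)))) : List (String × Int) :=
  (pvLoopA ((PySem.List.pyGet? pbp_data 0).getD []) PySem.Dict.empty).items

-- ===== PORT B =====
-- _first_scoring(plays, exclude): the enumerate loop returning (play['team'], plays[i+1:]) is the
-- structural recursion returning (team, rest); exclude=None ↦ none, and 'team != exclude' is
-- 'some team != exclude' (any string differs from None)
def pvFirstScoring : List (List (String × String)) → Option String →
    Option String × List (List (String × String))
  | [], _ => (none, [])
  | play :: rest, excl =>
    if pvTruthy play && some (pvTeam play) != excl then (some (pvTeam play), rest)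
    else pvFirstScoring rest excl

def initial_team_scores_alt (pbp_data : List (List (List (String × String)))) : List (String × Int) :=
  match pvFirstScoring ((PySem.List.pyGet? pbp_data 0).getD []) none with
  | (none, _) => []
  | (some first, rest) =>
    match (pvFirstScoring rest (some first)).1 with
    | none => [(first, 0)]
    | some second => [(first, 0), (second, 0)]

-- ===== PRECONDITION & SPEC =====
-- Pre_ excludes exactly the inputs on which Python A raises: empty pbp_data (IndexError), and a play of
-- pbp_data[0] missing 'ScoringPlay' (or scoring but missing 'team': KeyError) that A actually visits,
-- i.e. one not preceded by two distinct scoring teams (A breaks after the second distinct team, so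
-- malformed plays after that point stay INSIDE Pre_; B visits the same plays and raises there too).
def Pre_initial_team_scores (pbp_data : List (List (List (String × String)))) : Prop :=
  pbp_data ≠ [] ∧ ∀ i < (pbp_data.headD []).length,
    (¬ (((pbp_data.headD []).getD i []).lookup "ScoringPlay").isSome ∨
      (pvTruthy ((pbp_data.headD []).getD i []) ∧
        ¬ (((pbp_data.headD []).getD i []).lookup "team").isSome)) →
    2 ≤ (PySem.Set.ofList ((((pbp_data.headD []).take i).filter pvTruthy).map pvTeam)).length
instance (pbp_data : List (List (List (String × String)))) : Decidable (Pre_initial_team_scores pbp_data) := by unfold Pre_initial_team_scores; infer_instance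

def pvWitness_initial_team_scores : (List (List (List (String × String)))) :=
  [[[("ScoringPlay", "1"), ("team", "A")], [("ScoringPlay", ""), ("team", "B")]]]

def Spec_initial_team_scores (pbp_data : List (List (List (String × String)))) (out : List (String × Int)) : Prop := out = initial_team_scores_alt pbp_data
instance (pbp_data : List (List (List (String × String)))) (out : List (String × Int)) : Decidable (Spec_initial_team_scores pbp_data out) := by unfold Spec_initial_team_scores; infer_instance

-- ===== CLAIM (what is proved, stated in full; the proofs are below) =====
def Claim_equal_initial_team_scores : Prop := ∀ (pbp_data : List (List (List (String × String)))), Dom_initial_team_scores pbp_data → Pre_initial_team_scores pbp_data → Spec_initial_team_scores pbp_data (initial_team_scores pbp_data)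

-- ===== LEMMAS AND PROOFS =====

-- A's loop from the empty dict walks to the first scoring play, which is B's first search
lemma loopA_empty (plays : List (List (String × String))) :
    pvLoopA plays (PySem.Dict.mk []) =
      match pvFirstScoring plays none with
      | (none, _) => PySem.Dict.mk []
      | (some t, rest) => pvLoopA rest (PySem.Dict.mk [(t, 0)]) := by
  induction plays with
  | nil => rfl
  | cons play rest ih =>
    by_cases h : pvTruthy play
    · have hins : (PySem.Dict.mk ([] : List (String × Int))).insert (pvTeam play) 0
          = PySem.Dict.mk [(pvTeam play, 0)] := by
        apply PySem.Dict.ext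
        rw [PySem.Dict.items_insert_of_not_contains _ _ (by rfl)]
        rfl
      simp [pvLoopA, pvFirstScoring, PySem.Dict.size, h, hins]
    · simp [pvLoopA, pvFirstScoring, PySem.Dict.size, h, ih]

-- A's loop from a one-team dict walks to the first scoring play with a different team, B's second search
lemma loopA_one (plays : List (List (String × String))) (t : String) :
    pvLoopA plays (PySem.Dict.mk [(t, 0)]) =
      match (pvFirstScoring plays (some t)).1 with
      | none => PySem.Dict.mk [(t, 0)]
      | some u => PySem.Dict.mk [(t, 0), (u, 0)] := by
  induction plays with
  | nil => rfl
  | cons play rest ih =>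
    by_cases h : pvTruthy play
    · by_cases he : pvTeam play = t
      · have hins : (PySem.Dict.mk [(t, (0 : Int))]).insert (pvTeam play) 0
            = PySem.Dict.mk [(t, 0)] := by
          apply PySem.Dict.ext
          rw [PySem.Dict.items_insert_of_contains _ _ (by simp [he, PySem.Dict.contains_mk])]
          simp [he]
        rw [he] at hins
        simp [pvLoopA, pvFirstScoring, PySem.Dict.size, h, he, hins, ih]
      · have hins : (PySem.Dict.mk [(t, (0 : Int))]).insert (pvTeam play) 0
            = PySem.Dict.mk [(t, 0), (pvTeam play, 0)] := by
          apply PySem.Dict.ext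
          rw [PySem.Dict.items_insert_of_not_contains _ _
            (by simp [PySem.Dict.contains_mk]; exact fun hh => he hh.symm)]
          rfl
        simp [pvLoopA, pvFirstScoring, PySem.Dict.size, h, he, hins]
    · simp [pvLoopA, pvFirstScoring, PySem.Dict.size, h, ih]

-- ===== VERDICT (by name: the statement is the Claim_ definition above) =====
theorem initial_team_scores_spec : Claim_equal_initial_team_scores := by
  intro pbp_data _ _
  show initial_team_scores pbp_data = initial_team_scores_alt pbp_data
  unfold initial_team_scores initial_team_scores_alt
  rw [show (PySem.Dict.empty : PySem.Dict String Int) = PySem.Dict.mk [] from rfl, loopA_empty]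
  rcases hfs : pvFirstScoring ((PySem.List.pyGet? pbp_data 0).getD []) none with ⟨o, rest⟩
  cases o with
  | none => rfl
  | some t =>
    simp only [loopA_one]
    rcases (pvFirstScoring rest (some t)).1 with _ | u <;> rfl
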